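-- pv_equiv track=rewrite | github.com/Friday202/nutrition-ocr | donut/preprocess.py | process_ingredients
-- ===== SOURCE A (Python) =====
-- def process_ingredients(text):
--     """
--     Split text by commas but:
--     - Ignore commas inside parentheses
--     - Ignore commas that are part of numbers like 3,6%
--     - Trim whitespace for each ingredient
--     """
--     if not text or str(text).strip().lower() in {"nan", "/"}:
--         return []
--
--     ingredients = []
--     current = []
--     open_parens = 0
--
--     for i, char in enumerate(text):
--         # Track parentheses
--         if char == "(":
--             open_parens += 1
--         elif char == ")":
--             if open_parens > 0:
--                 open_parens -= 1
--
--         # Check if this comma should be ignored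
--         if char == ",":
--             # Don't split if inside parentheses
--             if open_parens > 0:
--                 current.append(char)
--                 continue
--             # Don't split if part of a number (digit before AND after comma)
--             prev_char = text[i - 1] if i > 0 else ""
--             next_char = text[i + 1] if i + 1 < len(text) else ""
--             if prev_char.isdigit() and next_char.isdigit():
--                 current.append(char)
--                 continue
--             # Otherwise, it's a real separator
--             ingredient = "".join(current).strip()
--             if ingredient:
--                 ingredients.append(ingredient)
--             current = []
--         else:
--             current.append(char)
--
--     # Add last ingredient
--     ingredient = "".join(current).strip()
--     if ingredient:
--         ingredients.append(ingredient)
--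
--     return ingredients
-- ===== SOURCE B (Python) =====
-- def process_ingredients(text):
--     """
--     Split text by commas outside parentheses and not inside numbers,
--     as a two-pass algorithm: collect separator indices, then slice.
--     """
--     if not text or str(text).strip().lower() in {"nan", "/"}:
--         return []
--
--     n = len(text)
--     seps = []
--     open_parens = 0
--     for i, char in enumerate(text):
--         if char == "(":
--             open_parens += 1
--         elif char == ")":
--             if open_parens > 0:
--                 open_parens -= 1
--         elif char == ",":
--             if open_parens == 0 and not (
--                 i > 0 and text[i - 1].isdigit()
--                 and i + 1 < n and text[i + 1].isdigit()
--             ):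
--                 seps.append(i)
--
--     out = []
--     start = 0
--     for j in seps + [n]:
--         piece = text[start:j].strip()
--         if piece:
--             out.append(piece)
--         start = j + 1
--     return out
-- ===== Notes on version B (the rewrite author's own statement) =====
-- stated objective: alternative
-- what changed: B replaces A's character-accumulator loop by a two-pass index algorithm: one scan collects the indices of real separator commas, a second pass slices the text between consecutive separators, strips each slice and keeps the non-empty ones.
import Mathlib
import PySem

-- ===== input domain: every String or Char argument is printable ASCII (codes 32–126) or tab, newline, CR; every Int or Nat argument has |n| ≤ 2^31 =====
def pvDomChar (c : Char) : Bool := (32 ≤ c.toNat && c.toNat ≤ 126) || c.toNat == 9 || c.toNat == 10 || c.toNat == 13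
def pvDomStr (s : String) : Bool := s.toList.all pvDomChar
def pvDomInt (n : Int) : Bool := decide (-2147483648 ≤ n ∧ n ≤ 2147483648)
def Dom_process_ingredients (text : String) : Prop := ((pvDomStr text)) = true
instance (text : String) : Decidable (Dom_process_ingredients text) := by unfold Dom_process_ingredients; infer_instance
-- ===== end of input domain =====

-- B replaces A's character-accumulator loop by two passes (collect separator indices, then
-- slice the text between them); an alternative decomposition, same return value.

-- ===== PORT A =====
-- text[i] as the 1-char string Python builds ('' never occurs: the indices are guarded in both Pythons)
def pvCharAt (cs : List Char) (i : Int) : List Char :=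
  (PySem.List.pyGet? cs i).elim [] (fun c => [c])

-- the body of A's for-loop; state = (ingredients, current, open_parens)
def pvAStep (cs : List Char) (s : List String × List Char × Int) (p : Int × Char) :
    List String × List Char × Int :=
  let ings := s.1; let current := s.2.1; let op0 := s.2.2
  let i := p.1; let ch := p.2
  let op := if ch = '(' then op0 + 1
            else if ch = ')' then (if op0 > 0 then op0 - 1 else op0)
            else op0
  if ch = ',' then
    if op > 0 then (ings, current ++ [ch], op)
    else
      let prev : List Char := if i > 0 then pvCharAt cs (i - 1) else []
      let next : List Char := if i + 1 < (cs.length : Int) then pvCharAt cs (i + 1) else []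
      if PySem.Chars.strIsdigit prev && PySem.Chars.strIsdigit next then
        (ings, current ++ [ch], op)
      else
        let ingredient := PySem.Chars.strip current
        (if ingredient ≠ [] then ings ++ [String.ofList ingredient] else ings, [], op)
  else (ings, current ++ [ch], op)

def process_ingredients (text : String) : List String :=
  if text.toList = [] ∨ PySem.Chars.lower (PySem.Chars.strip text.toList) = "nan".toList
      ∨ PySem.Chars.lower (PySem.Chars.strip text.toList) = "/".toList then []
  else
    let cs := text.toList
    let r := (PySem.List.enumerate cs).foldl (pvAStep cs) ([], [], 0)
    -- add last ingredient
    let ingredient := PySem.Chars.strip r.2.1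
    if ingredient ≠ [] then r.1 ++ [String.ofList ingredient] else r.1

-- ===== PORT B =====
-- first pass of B: collect the indices of separator commas; state = (open_parens, seps)
def pvBScan (cs : List Char) (s : Int × List Int) (p : Int × Char) : Int × List Int :=
  let op := s.1; let seps := s.2; let i := p.1; let ch := p.2
  if ch = '(' then (op + 1, seps)
  else if ch = ')' then (if op > 0 then op - 1 else op, seps)
  else if ch = ',' then
    if op = 0 ∧ ¬((0 < i) ∧ PySem.Chars.strIsdigit (pvCharAt cs (i - 1)) = true
                  ∧ (i + 1 < (cs.length : Int)) ∧ PySem.Chars.strIsdigit (pvCharAt cs (i + 1)) = true)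
    then (op, seps ++ [i]) else (op, seps)
  else (op, seps)

-- second pass of B: slice between consecutive boundaries; state = (out, start)
def pvBEmit (cs : List Char) (s : List String × Int) (j : Int) : List String × Int :=
  let piece := PySem.Chars.strip (PySem.List.slice cs (some s.2) (some j))
  (if piece ≠ [] then s.1 ++ [String.ofList piece] else s.1, j + 1)

def process_ingredients_alt (text : String) : List String :=
  if text.toList = [] ∨ PySem.Chars.lower (PySem.Chars.strip text.toList) = "nan".toList
      ∨ PySem.Chars.lower (PySem.Chars.strip text.toList) = "/".toList then []
  else
    let cs := text.toList
    let seps := ((PySem.List.enumerate cs).foldl (pvBScan cs) (0, [])).2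
    ((seps ++ [(cs.length : Int)]).foldl (pvBEmit cs) ([], 0)).1

-- ===== PRECONDITION & SPEC =====
def Spec_process_ingredients (text : String) (out : List String) : Prop := out = process_ingredients_alt text
instance (text : String) (out : List String) : Decidable (Spec_process_ingredients text out) := by unfold Spec_process_ingredients; infer_instance

-- ===== CLAIM (what is proved, stated in full; the proofs are below) =====
def Claim_equal_process_ingredients : Prop := ∀ (text : String), Dom_process_ingredients text → Spec_process_ingredients text (process_ingredients text)

-- ===== LEMMAS AND PROOFS =====

lemma pvBScan_acc (cs : List Char) (l : List (Int × Char)) (op : Int) (seps : List Int) :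
    l.foldl (pvBScan cs) (op, seps)
      = ((l.foldl (pvBScan cs) (op, [])).1, seps ++ (l.foldl (pvBScan cs) (op, [])).2) := by
  induction l generalizing op seps with
  | nil => simp
  | cons p t ih =>
    simp only [List.foldl_cons]
    rw [ih (pvBScan cs (op, seps) p).1 (pvBScan cs (op, seps) p).2,
        ih (pvBScan cs (op, []) p).1 (pvBScan cs (op, []) p).2]
    unfold pvBScan
    by_cases h1 : p.2 = '(' <;> by_cases h2 : p.2 = ')' <;> by_cases h3 : p.2 = ',' <;>
      simp [h1, h2, h3] <;> (split_ifs <;> simp)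

lemma pvMain (l pre : List Char) (ings : List String) (op : Int) (start : Nat)
    (hop : 0 ≤ op) (hst : start ≤ pre.length) :
    (let r := (PySem.List.enumerate l (pre.length : Int)).foldl (pvAStep (pre ++ l)) (ings, pre.drop start, op)
     let ingredient := PySem.Chars.strip r.2.1
     if ingredient ≠ [] then r.1 ++ [String.ofList ingredient] else r.1)
    = (((((PySem.List.enumerate l (pre.length : Int)).foldl (pvBScan (pre ++ l)) (op, [])).2)
          ++ [((pre ++ l).length : Int)]).foldl (pvBEmit (pre ++ l)) (ings, (start : Int))).1 := by
  induction l generalizing pre ings op start with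
  | nil =>
    simp only [PySem.List.enumerate_nil, List.foldl_nil, List.append_nil, List.nil_append,
      List.foldl_cons]
    have hsl : PySem.List.slice pre (some (start:Int)) (some (pre.length:Int)) = pre.drop start := by
      rw [PySem.List.slice_natCast]; simp
    simp [pvBEmit, hsl]
  | cons c t ih =>
    have hcs : pre ++ c :: t = (pre ++ [c]) ++ t := by simp
    have hdrop : (pre ++ c :: t).drop start = pre.drop start ++ c :: t :=
      List.drop_append_of_le_length hst
    have hlen1 : ((pre ++ [c]).length : Int) = (pre.length : Int) + 1 := by simp
    have hcur : ∀ ch : Char, pre.drop start ++ [ch] = (pre ++ [ch]).drop start := by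
      intro ch; rw [List.drop_append_of_le_length hst]
    have hslice : PySem.List.slice (pre ++ c :: t) (some (start:Int)) (some (pre.length:Int))
        = pre.drop start := by
      rw [PySem.List.slice_natCast, List.drop_append_of_le_length hst]
      have hl : (pre.drop start).length = pre.length - start := by simp
      rw [← hl, List.take_left]
    simp only [PySem.List.enumerate_cons, List.foldl_cons]
    by_cases h1 : c = '('
    · -- open paren
      have hA : pvAStep (pre ++ c :: t) (ings, pre.drop start, op) ((pre.length : Int), c)
          = (ings, (pre ++ [c]).drop start, op + 1) := by
        simp [pvAStep, h1, ← hcur]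
      have hB : pvBScan (pre ++ c :: t) (op, []) ((pre.length : Int), c) = (op + 1, []) := by
        simp [pvBScan, h1]
      rw [hA, hB]
      have := ih (pre ++ [c]) ings (op + 1) start (by omega) (by simp; omega)
      rw [hcs, ← hlen1]
      simpa [← hcs] using this
    · have hcont : ∀ op' : Int, 0 ≤ op' →
          (let r := (PySem.List.enumerate t ((pre.length : Int) + 1)).foldl (pvAStep (pre ++ c :: t)) (ings, (pre ++ [c]).drop start, op')
           let ingredient := PySem.Chars.strip r.2.1
           if ingredient ≠ [] then r.1 ++ [String.ofList ingredient] else r.1)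
          = (((((PySem.List.enumerate t ((pre.length : Int) + 1)).foldl (pvBScan (pre ++ c :: t)) (op', [])).2)
                ++ [((pre ++ c :: t).length : Int)]).foldl (pvBEmit (pre ++ c :: t)) (ings, (start : Int))).1 := by
        intro op' h
        have := ih (pre ++ [c]) ings op' start h (by simp only [List.length_append, List.length_cons, List.length_nil]; omega)
        rw [hcs, ← hlen1]
        simpa [← hcs] using this
      by_cases h2 : c = ')'
      · have hA : pvAStep (pre ++ c :: t) (ings, pre.drop start, op) ((pre.length : Int), c)
            = (ings, (pre ++ [c]).drop start, if op > 0 then op - 1 else op) := by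
          simp [pvAStep, h2, ← hcur]
        have hB : pvBScan (pre ++ c :: t) (op, []) ((pre.length : Int), c)
            = (if op > 0 then op - 1 else op, []) := by
          simp [pvBScan, h2]
        rw [hA, hB]
        exact hcont _ (by split_ifs <;> omega)
      · by_cases h3 : c = ','
        · -- comma
          subst h3
          by_cases hp : op > 0
          · have hA : pvAStep (pre ++ ',' :: t) (ings, pre.drop start, op) ((pre.length : Int), ',')
                = (ings, (pre ++ [',']).drop start, op) := by
              simp [pvAStep, hp, ← hcur]
            have hB : pvBScan (pre ++ ',' :: t) (op, []) ((pre.length : Int), ',') = (op, []) := by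
              simp [pvBScan]
              intro h; omega
            rw [hA, hB]
            exact hcont _ hop
          · have hz : op = 0 := by omega
            subst hz
            by_cases hd : 0 < pre.length
                ∧ PySem.Chars.strIsdigit (pvCharAt (pre ++ ',' :: t) ((pre.length : Int) - 1)) = true
                ∧ 0 < t.length
                ∧ PySem.Chars.strIsdigit (pvCharAt (pre ++ ',' :: t) ((pre.length : Int) + 1)) = true
            · -- digit-flanked comma: both keep it
              obtain ⟨hd1, hd2, hd3, hd4⟩ := hd
              have hA : pvAStep (pre ++ ',' :: t) (ings, pre.drop start, 0) ((pre.length : Int), ',')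
                  = (ings, (pre ++ [',']).drop start, 0) := by
                simp [pvAStep, hd1, hd3, ← hcur]
                exact ⟨hd2, hd4⟩
              have hB : pvBScan (pre ++ ',' :: t) (0, []) ((pre.length : Int), ',') = (0, []) := by
                simp [pvBScan, hd1, hd3]
                exact ⟨hd2, hd4⟩
              rw [hA, hB]
              exact hcont _ le_rfl
            · -- real separator
              have hA : pvAStep (pre ++ ',' :: t) (ings, pre.drop start, 0) ((pre.length : Int), ',')
                  = (if PySem.Chars.strip (pre.drop start) ≠ [] then
                       ings ++ [String.ofList (PySem.Chars.strip (pre.drop start))] else ings,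
                     [], 0) := by
                have hnil : PySem.Chars.strIsdigit ([] : List Char) = false := by decide
                by_cases hq1 : 0 < pre.length <;> by_cases hq2 : 0 < t.length <;>
                  simp [pvAStep, hq1, hq2, hnil]
                intro hx
                rw [← Bool.not_eq_true]
                intro hy
                exact hd ⟨hq1, hx, hq2, hy⟩
              have hB : pvBScan (pre ++ ',' :: t) (0, []) ((pre.length : Int), ',')
                  = (0, [(pre.length : Int)]) := by
                simp only [pvBScan]
                simp [hd]
              rw [hA, hB, pvBScan_acc]
              have e1 : (([(pre.length : Int)] ++ ((PySem.List.enumerate t ((pre.length : Int) + 1)).foldl (pvBScan (pre ++ ',' :: t)) (0, [])).2)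
                    ++ [((pre ++ ',' :: t).length : Int)])
                  = (pre.length : Int) :: (((PySem.List.enumerate t ((pre.length : Int) + 1)).foldl (pvBScan (pre ++ ',' :: t)) (0, [])).2
                    ++ [((pre ++ ',' :: t).length : Int)]) := by simp
              rw [e1, List.foldl_cons]
              have e2 : pvBEmit (pre ++ ',' :: t) (ings, (start : Int)) ((pre.length : Int))
                  = (if PySem.Chars.strip (pre.drop start) ≠ [] then
                       ings ++ [String.ofList (PySem.Chars.strip (pre.drop start))] else ings,
                     (pre.length : Int) + 1) := by
                simp [pvBEmit, hslice]
              rw [e2]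
              have := ih (pre ++ [','])
                (if PySem.Chars.strip (pre.drop start) ≠ [] then
                   ings ++ [String.ofList (PySem.Chars.strip (pre.drop start))] else ings)
                0 (pre.length + 1) le_rfl
                (by simp only [List.length_append, List.length_cons, List.length_nil]; omega)
              have hdrop2 : (pre ++ [',']).drop (pre.length + 1) = [] := by
                apply List.drop_eq_nil_of_le; simp
              have hcast : ((pre.length + 1 : Nat) : Int) = (pre.length : Int) + 1 := by push_cast; ring
              rw [hcs, ← hlen1]
              rw [hdrop2, hcast] at this
              simpa [← hcs, hlen1] using this
        · -- ordinary character
          have hA : pvAStep (pre ++ c :: t) (ings, pre.drop start, op) ((pre.length : Int), c)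
              = (ings, (pre ++ [c]).drop start, op) := by
            simp [pvAStep, h1, h2, h3, ← hcur]
          have hB : pvBScan (pre ++ c :: t) (op, []) ((pre.length : Int), c) = (op, []) := by
            simp [pvBScan, h1, h2, h3]
          rw [hA, hB]
          exact hcont _ hop

theorem pv_top (text : String) : process_ingredients text = process_ingredients_alt text := by
  unfold process_ingredients process_ingredients_alt
  split_ifs with h
  · rfl
  · have := pvMain text.toList [] [] 0 0 (le_refl 0) (by simp)
    simpa using this

-- ===== VERDICT (by name: the statement is the Claim_ definition above) =====
theorem process_ingredients_spec : Claim_equal_process_ingredients := by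
  intro text _
  unfold Spec_process_ingredients
  exact pv_top text
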